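-- pv_equiv track=rewrite | github.com/crixodia/aoc | 2015/11_corporate_policy/main.py | req1
-- ===== SOURCE A (Python) =====
-- def req1(s):
--     count = 1
--     last = s[0]
--     for i in range(1, len(s)):
--         if ord(last) + 1 == ord(s[i]):
--             count += 1
--         elif count >= 3:
--             return True
--         else:
--             count = 1
--         last = s[i]
--     return count >= 3
-- ===== SOURCE B (Python) =====
-- def req1(s):
--     return any(ord(a) + 1 == ord(b) and ord(b) + 1 == ord(c)
--                for a, b, c in zip(s, s[1:], s[2:]))
-- ===== Notes on version B (the rewrite author's own statement) =====
-- stated objective: simpler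
-- what changed: Replaces the stateful count/last run-length scan with a stateless any() over sliding windows of three consecutive characters.
-- crash fix: A raises IndexError on the empty string (it reads s[0] unconditionally); B returns False there. — e.g. on req1(""): A raises IndexError, B returns false
import Mathlib
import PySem

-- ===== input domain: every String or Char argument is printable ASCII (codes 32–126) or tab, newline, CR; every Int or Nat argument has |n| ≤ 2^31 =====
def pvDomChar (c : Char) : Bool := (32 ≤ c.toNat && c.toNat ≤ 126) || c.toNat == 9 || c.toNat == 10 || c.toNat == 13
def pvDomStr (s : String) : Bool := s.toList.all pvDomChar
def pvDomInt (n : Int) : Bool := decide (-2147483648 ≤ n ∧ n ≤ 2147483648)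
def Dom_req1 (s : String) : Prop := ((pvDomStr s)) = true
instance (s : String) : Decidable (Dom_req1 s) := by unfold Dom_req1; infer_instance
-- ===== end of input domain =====

-- B replaces A's stateful count/last run-length scan with a stateless sliding-window
-- scan over triples of consecutive characters (simpler); return value only, no mutation.

-- ===== PORT A =====
-- A's for-loop over s[1:]: state (count, last); early `return True` when a run of ≥ 3
-- breaks, final `return count >= 3`.
def req1Loop : List Char → Int → Char → Bool
  | [], count, _ => decide (3 ≤ count)
  | c :: rest, count, last =>
    if last.toNat + 1 == c.toNat then req1Loop rest (count + 1) c
    else if (3 : Int) ≤ count then true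
    else req1Loop rest 1 c

def req1 (s : String) : Bool :=
  match s.toList with
  | [] => false        -- A raises IndexError on s[0] here; excluded by Pre_req1
  | c :: rest => req1Loop rest 1 c

-- ===== PORT B =====
-- Source B's any(...) over zip(s, s[1:], s[2:]): scan each window of three adjacent chars.
def req1Win : List Char → Bool
  | a :: b :: c :: rest =>
      (a.toNat + 1 == b.toNat && b.toNat + 1 == c.toNat) || req1Win (b :: c :: rest)
  | _ => false

def req1_alt (s : String) : Bool := req1Win s.toList

-- ===== PRECONDITION & SPEC =====
-- Pre_ excludes only the empty string, on which A raises IndexError at s[0].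
def Pre_req1 (s : String) : Prop := s ≠ ""
instance (s : String) : Decidable (Pre_req1 s) := by unfold Pre_req1; infer_instance
def pvWitness_req1 : String := "abcx"

-- A raises IndexError on the empty string (it reads s[0] unconditionally); B returns False there.
def Raises_req1 (s : String) : Prop := s = ""
instance (s : String) : Decidable (Raises_req1 s) := by unfold Raises_req1; infer_instance
def pvRaiseWitness_req1 : String := ""
def pvRaiseWitnessOut_req1 : Bool := false

def Spec_req1 (s : String) (out : Bool) : Prop := out = req1_alt s
instance (s : String) (out : Bool) : Decidable (Spec_req1 s out) := by unfold Spec_req1; infer_instance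

-- ===== CLAIM (what is proved, stated in full; the proofs are below) =====
def Claim_equal_req1 : Prop := ∀ (s : String), Dom_req1 s → Pre_req1 s → Spec_req1 s (req1 s)
def Claim_raises_req1 : Prop := (∀ (s : String), Dom_req1 s → Raises_req1 s → ¬ Pre_req1 s) ∧ (Dom_req1 (pvRaiseWitness_req1) ∧ Raises_req1 (pvRaiseWitness_req1) ∧ req1_alt (pvRaiseWitness_req1) = pvRaiseWitnessOut_req1)

-- ===== LEMMAS AND PROOFS =====

-- length of the strictly-ascending (by successor code) prefix of l continuing from `last`
def ascLen : Char → List Char → Nat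
  | _, [] => 0
  | last, c :: rest => if last.toNat + 1 = c.toNat then 1 + ascLen c rest else 0

theorem win_of_ascLen_two (c : Char) (l : List Char) (h : 2 ≤ ascLen c l) :
    req1Win (c :: l) = true := by
  match l with
  | [] => simp [ascLen] at h
  | [d] =>
    simp only [ascLen] at h
    split_ifs at h <;> simp at h
  | d :: e :: rest =>
    simp only [ascLen] at h
    split_ifs at h with h1 h2
    · simp [req1Win, h1, h2]
    · omega
    · omega

theorem req1Loop_eq (l : List Char) : ∀ (last : Char) (count : Int), 1 ≤ count →
    req1Loop l count last
      = (decide ((3 : Int) ≤ count + ascLen last l) || req1Win (last :: l)) := by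
  induction l with
  | nil =>
    intro last count _
    simp [req1Loop, ascLen, req1Win]
  | cons c rest ih =>
    intro last count hc
    by_cases hsucc : last.toNat + 1 = c.toNat
    · have h1 : req1Loop (c :: rest) count last = req1Loop rest (count + 1) c := by
        simp [req1Loop, hsucc]
      rw [h1, ih c (count + 1) (by omega)]
      have hAsc : ascLen last (c :: rest) = 1 + ascLen c rest := by simp [ascLen, hsucc]
      match rest with
      | [] =>
        simp only [hAsc, req1Win]
        have : count + 1 + (ascLen c [] : Int) = count + ((1 + ascLen c [] : Nat) : Int) := by
          push_cast [ascLen]; ring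
        rw [this]
      | d :: rest' =>
        by_cases hcd : c.toNat + 1 = d.toNat
        · have h2 : (3:Int) ≤ count + 1 + ascLen c (d :: rest') := by
            have : 1 ≤ ascLen c (d :: rest') := by simp [ascLen, hcd]
            omega
          have h3 : (3:Int) ≤ count + ascLen last (c :: d :: rest') := by
            rw [hAsc]; omega
          simp [h2, h3]
        · have hwin : req1Win (last :: c :: d :: rest') = req1Win (c :: d :: rest') := by
            simp [req1Win, hcd]
          rw [hwin, hAsc]
          have : count + 1 + (ascLen c (d :: rest') : Int)
               = count + ((1 + ascLen c (d :: rest') : Nat) : Int) := by push_cast; ring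
          rw [this]
    · by_cases h3 : (3:Int) ≤ count
      · have hL : req1Loop (c :: rest) count last = true := by
          simp [req1Loop, hsucc, h3]
        have hR : (3:Int) ≤ count + ascLen last (c :: rest) := by
          have : (0:Int) ≤ (ascLen last (c :: rest) : Int) := Int.natCast_nonneg _
          omega
        simp [hL, hR]
      · have hL : req1Loop (c :: rest) count last = req1Loop rest 1 c := by
          simp [req1Loop, hsucc, h3]
        rw [hL, ih c 1 (by omega)]
        have hAsc : ascLen last (c :: rest) = 0 := by simp [ascLen, hsucc]
        have hR3 : ¬ (3:Int) ≤ count + ascLen last (c :: rest) := by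
          rw [hAsc]; omega
        have hwin : req1Win (last :: c :: rest) = req1Win (c :: rest) := by
          match rest with
          | [] => simp [req1Win]
          | d :: rest' => simp [req1Win, hsucc]
        rw [hwin]
        simp only [hR3, decide_false, Bool.false_or]
        by_cases hA2 : 2 ≤ ascLen c rest
        · have hw := win_of_ascLen_two c rest hA2
          have : (3:Int) ≤ 1 + ascLen c rest := by omega
          simp [this, hw]
        · have : ¬ (3:Int) ≤ 1 + (ascLen c rest : Int) := by omega
          simp [this]

-- ===== VERDICT (by name: the statement is the Claim_ definition above) =====
theorem req1_spec : Claim_equal_req1 := by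
  intro s _ hpre
  unfold Spec_req1 req1 req1_alt
  match hs : s.toList with
  | [] =>
    exact absurd (by rw [← s.toList_inj] at *; simpa using hs) hpre
  | c :: rest =>
    show req1Loop rest 1 c = req1Win (c :: rest)
    rw [req1Loop_eq rest c 1 (by omega)]
    by_cases hA2 : 2 ≤ ascLen c rest
    · have hw := win_of_ascLen_two c rest hA2
      have : (3:Int) ≤ 1 + ascLen c rest := by omega
      simp [this, hw]
    · have : ¬ (3:Int) ≤ 1 + (ascLen c rest : Int) := by omega
      simp [this]

@[simp] theorem req1_raises : Claim_raises_req1 := by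
  unfold Claim_raises_req1
  exact ⟨by intro s _ hr; unfold Raises_req1 Pre_req1 at *; simp [hr], by decide⟩
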